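-- pv_equiv track=rewrite | github.com/muyongKim/Step-By-Step | Programmers/Level 1/CalculateInsufficientAmount.py | solution
-- ===== SOURCE A (Python) =====
-- def solution(price, money, count):
--     amount = 0
--
--     for i in range(1, count+1):
--         amount += price * i
--
--     if amount > money:
--         return amount - money
--     else:
--         return 0
-- ===== SOURCE B (Python) =====
-- def solution(price, money, count):
--     n = count if count > 0 else 0
--     total = price * n * (n + 1) // 2
--     return total - money if total > money else 0
-- ===== Notes on version B (the rewrite author's own statement) =====
-- stated objective: faster
-- what changed: Replaced the O(count) accumulation loop with the closed-form arithmetic series price*n*(n+1)//2 (n = max(count,0)).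
import Mathlib
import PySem

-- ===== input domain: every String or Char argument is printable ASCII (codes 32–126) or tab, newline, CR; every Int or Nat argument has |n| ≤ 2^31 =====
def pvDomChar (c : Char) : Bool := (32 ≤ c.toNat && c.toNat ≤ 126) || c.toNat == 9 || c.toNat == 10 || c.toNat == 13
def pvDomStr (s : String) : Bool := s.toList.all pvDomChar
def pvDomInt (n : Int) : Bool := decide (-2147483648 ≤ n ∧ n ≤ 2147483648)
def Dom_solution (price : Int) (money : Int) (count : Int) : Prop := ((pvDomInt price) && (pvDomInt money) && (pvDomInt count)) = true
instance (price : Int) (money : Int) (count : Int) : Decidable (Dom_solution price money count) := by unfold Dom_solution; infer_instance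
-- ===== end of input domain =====

-- ===== PORT A =====
-- A: accumulate price*i for i in range(1, count+1), then compare to money.
def solution (price : Int) (money : Int) (count : Int) : Int :=
  let amount := (PySem.List.pyRange 1 (count + 1) 1).foldl (fun a i => a + price * i) 0
  if amount > money then amount - money else 0

-- ===== PORT B =====
-- B: closed-form arithmetic series; faster (O(1) vs O(count)).
def solution_alt (price : Int) (money : Int) (count : Int) : Int :=
  let n := if count > 0 then count else 0
  let total := PySem.Int.floordiv (price * n * (n + 1)) 2
  if total > money then total - money else 0

-- ===== PRECONDITION & SPEC =====
def Spec_solution (price : Int) (money : Int) (count : Int) (out : Int) : Prop := out = solution_alt price money count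
instance (price : Int) (money : Int) (count : Int) (out : Int) : Decidable (Spec_solution price money count out) := by unfold Spec_solution; infer_instance

-- ===== CLAIM (what is proved, stated in full; the proofs are below) =====
def Claim_equal_solution : Prop := ∀ (price : Int) (money : Int) (count : Int), Dom_solution price money count → Spec_solution price money count (solution price money count)

-- ===== LEMMAS AND PROOFS =====

-- ===== VERDICT (by name: the statement is the Claim_ definition above) =====
-- sum of price*i over range(1, m+1) for m = toNat bound
lemma sum_series (price : Int) (n : Nat) :
    (PySem.List.pyRange 1 ((n : Int) + 1) 1).foldl (fun a i => a + price * i) 0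
      = price * n * (n + 1) / 2 := by
  induction n with
  | zero => simp [PySem.List.pyRange_one_eq_nil]
  | succ k ih =>
      have h : (1 : Int) ≤ (k : Int) + 1 := by omega
      have hsplit := PySem.List.pyRange_one_succ_right (a := 1) (b := (k : Int) + 1) h
      push_cast
      push_cast at ih
      rw [show ((k : Int) + 1 + 1) = ((k : Int) + 1) + 1 by ring, hsplit, List.foldl_append, ih]
      simp only [List.foldl]
      obtain ⟨m, hm⟩ := Int.even_mul_succ_self (k : Int)
      have h1 : price * (k : Int) * ((k : Int) + 1) / 2 = price * m := by
        rw [show price * (k : Int) * ((k : Int) + 1) = 2 * (price * m) by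
          rw [mul_assoc, hm]; ring]
        exact Int.mul_ediv_cancel_left _ (by norm_num)
      have h2 : price * ((k : Int) + 1) * ((k : Int) + 1 + 1) / 2 = price * (m + (k : Int) + 1) := by
        rw [show price * ((k : Int) + 1) * ((k : Int) + 1 + 1) = 2 * (price * (m + (k : Int) + 1)) by
          have : ((k : Int) + 1) * ((k : Int) + 1 + 1) = 2 * (m + (k : Int) + 1) := by
            linear_combination hm
          rw [mul_assoc, this]; ring]
        exact Int.mul_ediv_cancel_left _ (by norm_num)
      rw [h1, h2]; ring

theorem solution_spec : Claim_equal_solution := by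
  intro price money count _
  unfold Spec_solution solution solution_alt
  by_cases hc : count > 0
  · simp only [if_pos hc]
    rw [PySem.Int.floordiv_eq_ediv_of_pos (by norm_num)]
    have hn : count = ((count.toNat : Int)) := by omega
    rw [hn, sum_series price count.toNat]
  · simp only [if_neg hc]
    rw [PySem.List.pyRange_one_eq_nil (by omega)]
    norm_num [PySem.Int.floordiv]
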